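-- pv_equiv track=rewrite | github.com/RishitaUikey/Basic-python | Assignment/List/137.py | find_first_even_odd
-- ===== SOURCE A (Python) =====
-- def find_first_even_odd(lst):
--     first_even = None
--     first_odd = None
--
--     for num in lst:
--         if num % 2 == 0 and first_even is None:
--             first_even = num
--         elif num % 2 != 0 and first_odd is None:
--             first_odd = num
--         if first_even is not None and first_odd is not None:
--             break
--
--     return first_even, first_odd
-- ===== SOURCE B (Python) =====
-- def find_first_even_odd(lst):
--     first_even = next((x for x in lst if x % 2 == 0), None)
--     first_odd = next((x for x in lst if x % 2 != 0), None)
--     return first_even, first_odd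
-- ===== Notes on version B (the rewrite author's own statement) =====
-- stated objective: idiomatic
-- what changed: Replaced the single interleaved loop with two flags and an early break by two independent first-match scans written as generator expressions with next(..., None).
import Mathlib
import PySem

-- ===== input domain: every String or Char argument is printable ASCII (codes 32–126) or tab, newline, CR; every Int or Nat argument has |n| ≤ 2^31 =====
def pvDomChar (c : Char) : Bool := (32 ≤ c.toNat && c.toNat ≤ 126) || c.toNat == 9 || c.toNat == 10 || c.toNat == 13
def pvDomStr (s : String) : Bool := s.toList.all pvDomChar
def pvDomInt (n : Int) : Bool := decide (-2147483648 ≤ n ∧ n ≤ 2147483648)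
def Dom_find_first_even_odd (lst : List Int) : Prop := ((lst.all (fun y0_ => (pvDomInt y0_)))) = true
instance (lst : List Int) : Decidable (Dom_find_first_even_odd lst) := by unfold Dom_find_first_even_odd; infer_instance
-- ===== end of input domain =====

-- B replaces A's single interleaved loop (two flags, early break) with two independent first-match scans; objective: idiomatic.


-- ===== PORT A =====
-- the for-loop with the two flags and the break, as structural recursion over the list
def ffeoLoop (lst : List Int) (first_even first_odd : Option Int) : Option Int × Option Int :=
  match lst with
  | [] => (first_even, first_odd)
  | num :: rest =>
    let fe := if PySem.Int.mod num 2 = 0 ∧ first_even = none then some num else first_even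
    let fo := if ¬(PySem.Int.mod num 2 = 0 ∧ first_even = none) ∧
                 PySem.Int.mod num 2 ≠ 0 ∧ first_odd = none then some num else first_odd
    if fe ≠ none ∧ fo ≠ none then (fe, fo) else ffeoLoop rest fe fo

def find_first_even_odd (lst : List Int) : Option Int × Option Int :=
  ffeoLoop lst none none

-- ===== PORT B =====
def find_first_even_odd_alt (lst : List Int) : Option Int × Option Int :=
  (lst.find? (fun x => PySem.Int.mod x 2 == 0),
   lst.find? (fun x => PySem.Int.mod x 2 != 0))

-- ===== PRECONDITION & SPEC =====
def Spec_find_first_even_odd (lst : List Int) (out : Option Int × Option Int) : Prop := out = find_first_even_odd_alt lst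
instance (lst : List Int) (out : Option Int × Option Int) : Decidable (Spec_find_first_even_odd lst out) := by unfold Spec_find_first_even_odd; infer_instance

-- ===== CLAIM (what is proved, stated in full; the proofs are below) =====
def Claim_equal_find_first_even_odd : Prop := ∀ (lst : List Int), Dom_find_first_even_odd lst → Spec_find_first_even_odd lst (find_first_even_odd lst)

-- ===== LEMMAS AND PROOFS =====

-- loop invariant: the loop returns each flag, or else the first match in the rest
theorem ffeoLoop_eq (lst : List Int) (fe fo : Option Int) :
    ffeoLoop lst fe fo =
      (fe.orElse (fun _ => lst.find? (fun x => PySem.Int.mod x 2 == 0)),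
       fo.orElse (fun _ => lst.find? (fun x => PySem.Int.mod x 2 != 0))) := by
  induction lst generalizing fe fo with
  | nil => cases fe <;> cases fo <;> simp [ffeoLoop]
  | cons num rest ih =>
    by_cases he : num % 2 = 0
    · have h1 : ¬ num % 2 = 1 := by omega
      cases fe <;> cases fo <;>
        simp [ffeoLoop, List.find?, Int.dvd_iff_emod_eq_zero, he, h1, ih]
    · have h1 : num % 2 = 1 := by omega
      cases fe <;> cases fo <;>
        simp [ffeoLoop, List.find?, Int.dvd_iff_emod_eq_zero, he, h1, ih]

-- ===== VERDICT (by name: the statement is the Claim_ definition above) =====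
theorem find_first_even_odd_spec : Claim_equal_find_first_even_odd := by
  intro lst _
  unfold Spec_find_first_even_odd find_first_even_odd find_first_even_odd_alt
  simp [ffeoLoop_eq]
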